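-- pv_equiv track=rewrite | github.com/udao-moo/udao-spark-optimizer | udao_trace/parser/spark_parser.py | parse_conf
-- ===== SOURCE A (Python) =====
-- from typing import Dict, List, Optional, Tuple
--
-- THETA_C = [
--     "spark.executor.cores",
--     "spark.executor.memory",
--     "spark.executor.instances",
--     "spark.default.parallelism",
--     "spark.reducer.maxSizeInFlight",
--     "spark.shuffle.sort.bypassMergeThreshold",
--     "spark.shuffle.compress",
--     "spark.memory.fraction",
-- ]
--
-- THETA_P = [
--     "spark.sql.adaptive.advisoryPartitionSizeInBytes",
--     "spark.sql.adaptive.nonEmptyPartitionRatioForBroadcastJoin",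
--     "spark.sql.adaptive.maxShuffledHashJoinLocalMapThreshold",
--     "spark.sql.adaptive.autoBroadcastJoinThreshold",
--     "spark.sql.shuffle.partitions",
--     "spark.sql.adaptive.skewJoin.skewedPartitionThresholdInBytes",
--     "spark.sql.adaptive.skewJoin.skewedPartitionFactor",
--     "spark.sql.files.maxPartitionBytes",
--     "spark.sql.files.openCostInBytes",
-- ]
--
-- THETA_S = [
--     "spark.sql.adaptive.rebalancePartitionsSmallPartitionFactor",
--     "spark.sql.adaptive.coalescePartitions.minPartitionSize",
-- ]
--
-- def parse_conf(conf: Dict) -> Dict: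
--     d = {
--         f"{k}": v
--         for k_type, k_list in conf.items()
--         for kv in k_list
--         for k, v in kv.items()
--     }
--     return {
--         **{f"theta_c-{k}": d[k] for k in THETA_C if k in d},
--         **{f"theta_p-{k}": d[k] for k in THETA_P if k in d},
--         **{f"theta_s-{k}": d[k] for k in THETA_S if k in d},
--     }
-- ===== SOURCE B (Python) =====
-- from typing import Dict, List, Optional, Tuple
--
-- THETA_C = [
--     "spark.executor.cores",
--     "spark.executor.memory",
--     "spark.executor.instances",
--     "spark.default.parallelism",
--     "spark.reducer.maxSizeInFlight",
--     "spark.shuffle.sort.bypassMergeThreshold",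
--     "spark.shuffle.compress",
--     "spark.memory.fraction",
-- ]
--
-- THETA_P = [
--     "spark.sql.adaptive.advisoryPartitionSizeInBytes",
--     "spark.sql.adaptive.nonEmptyPartitionRatioForBroadcastJoin",
--     "spark.sql.adaptive.maxShuffledHashJoinLocalMapThreshold",
--     "spark.sql.adaptive.autoBroadcastJoinThreshold",
--     "spark.sql.shuffle.partitions",
--     "spark.sql.adaptive.skewJoin.skewedPartitionThresholdInBytes",
--     "spark.sql.adaptive.skewJoin.skewedPartitionFactor",
--     "spark.sql.files.maxPartitionBytes",
--     "spark.sql.files.openCostInBytes",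
-- ]
--
-- THETA_S = [
--     "spark.sql.adaptive.rebalancePartitionsSmallPartitionFactor",
--     "spark.sql.adaptive.coalescePartitions.minPartitionSize",
-- ]
--
-- # RANK maps each known key to (its position in the output, its prefix).
-- RANK = {
--     k: (i, p)
--     for i, (p, k) in enumerate(
--         [("theta_c-", k) for k in THETA_C]
--         + [("theta_p-", k) for k in THETA_P]
--         + [("theta_s-", k) for k in THETA_S]
--     )
-- }
--
-- def parse_conf(conf: Dict) -> Dict:
--     # one streaming pass over the data: classify each (k, v) by the rank index,
--     # drop unknown keys immediately (no flattened intermediate dict), last write wins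
--     found = {}
--     for k_list in conf.values():
--         for kv in k_list:
--             for k, v in kv.items():
--                 r = RANK.get(k)
--                 if r is not None:
--                     found[r[0]] = (r[1] + k, v)
--     # reassemble the result in output order by sorting the collected ranks
--     return {pk: v for _, (pk, v) in sorted(found.items(), key=lambda item: item[0])}
-- ===== Notes on version B (the rewrite author's own statement) =====
-- stated objective: alternative
-- what changed: A flattens conf into an intermediate dict and then runs three filter passes over the THETA key lists looking each key up in it; B never builds the flattened dict: it makes one streaming pass over the conf data classifying each (k, v) pair with a precomputed rank index (key -> (output position, prefix)), keeping only known keys, and reconstructs the output by sorting the collected ranks.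
import Mathlib
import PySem

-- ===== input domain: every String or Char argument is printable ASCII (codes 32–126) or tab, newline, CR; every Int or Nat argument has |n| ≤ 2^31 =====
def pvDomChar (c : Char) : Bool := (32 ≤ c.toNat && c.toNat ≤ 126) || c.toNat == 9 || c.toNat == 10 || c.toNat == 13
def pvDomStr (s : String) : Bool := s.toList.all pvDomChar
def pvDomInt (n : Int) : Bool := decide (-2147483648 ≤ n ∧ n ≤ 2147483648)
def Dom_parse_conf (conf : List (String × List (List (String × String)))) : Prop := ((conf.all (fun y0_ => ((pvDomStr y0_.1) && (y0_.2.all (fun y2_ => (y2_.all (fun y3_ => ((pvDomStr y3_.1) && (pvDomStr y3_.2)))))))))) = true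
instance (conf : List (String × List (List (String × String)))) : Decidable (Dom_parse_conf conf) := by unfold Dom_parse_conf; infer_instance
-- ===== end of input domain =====

-- B replaces A's flatten-then-three-filter-passes by one streaming pass over the data that
-- classifies each key with a rank index and reassembles the result by sorting the collected
-- ranks (objective: alternative decomposition, same cost).

def THETA_C : List String :=
  ["spark.executor.cores", "spark.executor.memory", "spark.executor.instances",
   "spark.default.parallelism", "spark.reducer.maxSizeInFlight",
   "spark.shuffle.sort.bypassMergeThreshold", "spark.shuffle.compress", "spark.memory.fraction"]

def THETA_P : List String :=
  ["spark.sql.adaptive.advisoryPartitionSizeInBytes",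
   "spark.sql.adaptive.nonEmptyPartitionRatioForBroadcastJoin",
   "spark.sql.adaptive.maxShuffledHashJoinLocalMapThreshold",
   "spark.sql.adaptive.autoBroadcastJoinThreshold", "spark.sql.shuffle.partitions",
   "spark.sql.adaptive.skewJoin.skewedPartitionThresholdInBytes",
   "spark.sql.adaptive.skewJoin.skewedPartitionFactor",
   "spark.sql.files.maxPartitionBytes", "spark.sql.files.openCostInBytes"]

def THETA_S : List String :=
  ["spark.sql.adaptive.rebalancePartitionsSmallPartitionFactor",
   "spark.sql.adaptive.coalescePartitions.minPartitionSize"]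

-- ===== PORT A =====
-- d = {k: v for k_type, k_list in conf.items() for kv in k_list for k, v in kv.items()}
def pvFlatten (conf : List (String × List (List (String × String)))) : PySem.Dict String String :=
  conf.foldl (fun d p =>
    p.2.foldl (fun d kv =>
      kv.foldl (fun d x => d.insert x.1 x.2) d) d) PySem.Dict.empty

-- {f"{pfx}{k}": d[k] for k in ks if k in d}
def pvSelect (d : PySem.Dict String String) (pfx : String) (ks : List String) :
    PySem.Dict String String :=
  ks.foldl (fun acc k =>
    match d.get? k with
    | some v => acc.insert (pfx ++ k) v
    | none => acc) PySem.Dict.empty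

def parse_conf (conf : List (String × List (List (String × String)))) : List (String × String) :=
  let d := pvFlatten conf
  -- {**{theta_c- part}, **{theta_p- part}, **{theta_s- part}}
  (((PySem.Dict.empty.update (pvSelect d "theta_c-" THETA_C).items).update
      (pvSelect d "theta_p-" THETA_P).items).update
      (pvSelect d "theta_s-" THETA_S).items).items

-- ===== PORT B =====
-- the table [("theta_c-", k) for k in THETA_C] + … that RANK enumerates
def pvTable : List (String × String) :=
  THETA_C.map (fun k => ("theta_c-", k)) ++ THETA_P.map (fun k => ("theta_p-", k))
    ++ THETA_S.map (fun k => ("theta_s-", k))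

-- RANK = {k: (i, p) for i, (p, k) in enumerate(…table…)}
def pvRank : PySem.Dict String (Int × String) :=
  PySem.Dict.ofList ((PySem.List.enumerate pvTable).map (fun ipk => (ipk.2.2, (ipk.1, ipk.2.1))))

-- innermost loop body: r = RANK.get(k); if r is not None: found[r[0]] = (r[1] + k, v)
def pvBStep (f : PySem.Dict Int (String × String)) (x : String × String) :
    PySem.Dict Int (String × String) :=
  match pvRank.get? x.1 with
  | some r => f.insert r.1 (r.2 ++ x.1, x.2)
  | none => f

def parse_conf_alt (conf : List (String × List (List (String × String)))) :
    List (String × String) :=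
  -- for k_list in conf.values(): for kv in k_list: for k, v in kv.items(): …
  let found := (conf.map Prod.snd).foldl (fun f klist =>
    klist.foldl (fun f kv => kv.foldl pvBStep f) f) PySem.Dict.empty
  -- {pk: v for _, (pk, v) in sorted(found.items(), key=lambda item: item[0])}
  ((PySem.List.sorted found.items (fun item => item.1) false).foldl
    (fun res item => res.insert item.2.1 item.2.2) PySem.Dict.empty).items

-- ===== PRECONDITION & SPEC =====
def Spec_parse_conf (conf : List (String × List (List (String × String)))) (out : List (String × String)) : Prop := out = parse_conf_alt conf
instance (conf : List (String × List (List (String × String)))) (out : List (String × String)) : Decidable (Spec_parse_conf conf out) := by unfold Spec_parse_conf; infer_instance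

-- ===== CLAIM (what is proved, stated in full; the proofs are below) =====
def Claim_equal_parse_conf : Prop := ∀ (conf : List (String × List (List (String × String)))), Dom_parse_conf conf → Spec_parse_conf conf (parse_conf conf)

-- ===== LEMMAS AND PROOFS =====

-- the n-th table entry
def pvEnt (n : Nat) : String × String := pvTable.getD n ("", "")

-- the item a table entry contributes to the result, if any
def pvSel (d : PySem.Dict String String) (pk : String × String) : Option (String × String) :=
  (d.get? pk.2).map (fun v => (pk.1 ++ pk.2, v))

-- A's innermost flatten step
def pvAStep (d : PySem.Dict String String) (x : String × String) : PySem.Dict String String :=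
  d.insert x.1 x.2

theorem pvF1 : ∀ n < 19, pvRank.get? (pvEnt n).2 = some ((n : Int), (pvEnt n).1) := by decide

-- pvRank's items, spelled out
def pvRankItems : List (String × (Int × String)) :=
  [("spark.executor.cores", ((0 : Int), "theta_c-")),
   ("spark.executor.memory", ((1 : Int), "theta_c-")),
   ("spark.executor.instances", ((2 : Int), "theta_c-")),
   ("spark.default.parallelism", ((3 : Int), "theta_c-")),
   ("spark.reducer.maxSizeInFlight", ((4 : Int), "theta_c-")),
   ("spark.shuffle.sort.bypassMergeThreshold", ((5 : Int), "theta_c-")),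
   ("spark.shuffle.compress", ((6 : Int), "theta_c-")),
   ("spark.memory.fraction", ((7 : Int), "theta_c-")),
   ("spark.sql.adaptive.advisoryPartitionSizeInBytes", ((8 : Int), "theta_p-")),
   ("spark.sql.adaptive.nonEmptyPartitionRatioForBroadcastJoin", ((9 : Int), "theta_p-")),
   ("spark.sql.adaptive.maxShuffledHashJoinLocalMapThreshold", ((10 : Int), "theta_p-")),
   ("spark.sql.adaptive.autoBroadcastJoinThreshold", ((11 : Int), "theta_p-")),
   ("spark.sql.shuffle.partitions", ((12 : Int), "theta_p-")),
   ("spark.sql.adaptive.skewJoin.skewedPartitionThresholdInBytes", ((13 : Int), "theta_p-")),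
   ("spark.sql.adaptive.skewJoin.skewedPartitionFactor", ((14 : Int), "theta_p-")),
   ("spark.sql.files.maxPartitionBytes", ((15 : Int), "theta_p-")),
   ("spark.sql.files.openCostInBytes", ((16 : Int), "theta_p-")),
   ("spark.sql.adaptive.rebalancePartitionsSmallPartitionFactor", ((17 : Int), "theta_s-")),
   ("spark.sql.adaptive.coalescePartitions.minPartitionSize", ((18 : Int), "theta_s-"))]

theorem pvRank_items_eq : pvRank.items = pvRankItems := by decide

-- every successful RANK lookup names a table position
theorem pvRank_get?_some (k : String) (r : Int × String) (h : pvRank.get? k = some r) :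
    ∃ n, n < 19 ∧ k = (pvEnt n).2 ∧ r = ((n : Int), (pvEnt n).1) := by
  have hm := PySem.Dict.mem_items_of_get?_eq_some pvRank h
  rw [pvRank_items_eq] at hm
  simp only [pvRankItems, List.mem_cons, List.not_mem_nil, or_false, Prod.mk.injEq] at hm
  rcases hm with ⟨rfl, rfl⟩|⟨rfl, rfl⟩|⟨rfl, rfl⟩|⟨rfl, rfl⟩|⟨rfl, rfl⟩|⟨rfl, rfl⟩|⟨rfl, rfl⟩|⟨rfl, rfl⟩|⟨rfl, rfl⟩|⟨rfl, rfl⟩|⟨rfl, rfl⟩|⟨rfl, rfl⟩|⟨rfl, rfl⟩|⟨rfl, rfl⟩|⟨rfl, rfl⟩|⟨rfl, rfl⟩|⟨rfl, rfl⟩|⟨rfl, rfl⟩|⟨rfl, rfl⟩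
  · exact ⟨0, by omega, by decide, by decide⟩
  · exact ⟨1, by omega, by decide, by decide⟩
  · exact ⟨2, by omega, by decide, by decide⟩
  · exact ⟨3, by omega, by decide, by decide⟩
  · exact ⟨4, by omega, by decide, by decide⟩
  · exact ⟨5, by omega, by decide, by decide⟩
  · exact ⟨6, by omega, by decide, by decide⟩
  · exact ⟨7, by omega, by decide, by decide⟩
  · exact ⟨8, by omega, by decide, by decide⟩
  · exact ⟨9, by omega, by decide, by decide⟩
  · exact ⟨10, by omega, by decide, by decide⟩
  · exact ⟨11, by omega, by decide, by decide⟩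
  · exact ⟨12, by omega, by decide, by decide⟩
  · exact ⟨13, by omega, by decide, by decide⟩
  · exact ⟨14, by omega, by decide, by decide⟩
  · exact ⟨15, by omega, by decide, by decide⟩
  · exact ⟨16, by omega, by decide, by decide⟩
  · exact ⟨17, by omega, by decide, by decide⟩
  · exact ⟨18, by omega, by decide, by decide⟩
-- the relation B's found dict keeps with A's flattened dict
def pvInv (d : PySem.Dict String String) (f : PySem.Dict Int (String × String)) : Prop :=
  (∀ n : Nat, n < 19 → f.get? (n : Int) = pvSel d (pvEnt n)) ∧
    (∀ j ∈ f.keys, ∃ n : Nat, n < 19 ∧ j = (n : Int)) ∧ f.keys.Nodup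

theorem pvInv_empty : pvInv PySem.Dict.empty PySem.Dict.empty := by
  refine ⟨fun n _ => ?_, fun j hj => ?_, ?_⟩
  · simp [pvSel, PySem.Dict.get?_empty]
  · simp [PySem.Dict.keys_empty] at hj
  · simp [PySem.Dict.keys_empty]

theorem pvInv_step (d : PySem.Dict String String) (f : PySem.Dict Int (String × String))
    (x : String × String) (h : pvInv d f) : pvInv (pvAStep d x) (pvBStep f x) := by
  obtain ⟨h1, h2, h3⟩ := h
  obtain ⟨k, v⟩ := x
  refine ⟨?_, ?_, ?_⟩
  · intro n hn
    by_cases hk : k = (pvEnt n).2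
    · subst hk
      simp only [pvBStep, pvF1 n hn]
      rw [PySem.Dict.get?_insert_self]
      simp [pvSel, pvAStep, PySem.Dict.get?_insert_self]
    · cases hr : pvRank.get? k with
      | none =>
        simp only [pvBStep, hr]
        rw [h1 n hn]
        simp only [pvSel, pvAStep]
        rw [PySem.Dict.get?_insert_of_ne d v (fun h : (pvEnt n).2 = k => hk h.symm)]
      | some r =>
        obtain ⟨m, hm, hkm, hrm⟩ := pvRank_get?_some k r hr
        subst hrm
        have hmn : m ≠ n := fun h => hk (by rw [hkm, h])
        simp only [pvBStep, hr]
        have hne : (n : Int) ≠ (m : Int) := by exact_mod_cast Ne.symm hmn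
        rw [PySem.Dict.get?_insert_of_ne f _ hne]
        rw [h1 n hn]
        simp only [pvSel, pvAStep]
        rw [PySem.Dict.get?_insert_of_ne d v (fun h : (pvEnt n).2 = k => hk h.symm)]
  · intro j hj
    cases hr : pvRank.get? k with
    | none => simp only [pvBStep, hr] at hj; exact h2 j hj
    | some r =>
      obtain ⟨m, hm, hkm, hrm⟩ := pvRank_get?_some k r hr
      subst hrm
      simp only [pvBStep, hr] at hj
      rw [PySem.Dict.mem_keys_insert] at hj
      rcases hj with h | h
      · exact ⟨m, hm, h⟩
      · exact h2 j h
  · cases hr : pvRank.get? k with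
    | none => simpa only [pvBStep, hr] using h3
    | some r => simp only [pvBStep, hr]; exact PySem.Dict.nodup_keys_insert f r.1 _ h3

theorem pvInv_foldl (xs : List (String × String)) :
    ∀ d f, pvInv d f → pvInv (xs.foldl pvAStep d) (xs.foldl pvBStep f) := by
  induction xs with
  | nil => intro d f h; exact h
  | cons x xs ih => intro d f h; exact ih _ _ (pvInv_step d f x h)

-- both nested loops are the fold of their step over the same flat stream of (k, v) pairs
def pvStream (conf : List (String × List (List (String × String)))) : List (String × String) :=
  ((conf.map Prod.snd).flatten).flatten

theorem pvFlatten_eq_stream (conf : List (String × List (List (String × String)))) :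
    pvFlatten conf = (pvStream conf).foldl pvAStep PySem.Dict.empty := by
  rw [pvStream, List.foldl_flatten, List.foldl_flatten, List.foldl_map]
  rfl

theorem pvFound_eq_stream (conf : List (String × List (List (String × String)))) :
    (conf.map Prod.snd).foldl (fun f klist =>
      klist.foldl (fun f kv => kv.foldl pvBStep f) f) PySem.Dict.empty
      = (pvStream conf).foldl pvBStep PySem.Dict.empty := by
  rw [pvStream, List.foldl_flatten, List.foldl_flatten]

theorem pvInv_conf (conf : List (String × List (List (String × String)))) :
    pvInv (pvFlatten conf)
      ((conf.map Prod.snd).foldl (fun f klist =>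
        klist.foldl (fun f kv => kv.foldl pvBStep f) f) PySem.Dict.empty) := by
  rw [pvFlatten_eq_stream, pvFound_eq_stream]
  exact pvInv_foldl _ _ _ pvInv_empty

-- filterMap over range l.length of a lookup is filterMap over l
theorem pvFilterMap_range {γ β : Type} (l : List γ) (dflt : γ) (h : γ → Option β) :
    (List.range l.length).filterMap (fun n => h (l.getD n dflt)) = l.filterMap h := by
  induction l using List.reverseRecOn with
  | nil => rfl
  | append_singleton l x ih =>
    rw [List.length_append, List.length_cons, List.length_nil, Nat.zero_add,
        List.range_succ, List.filterMap_append, List.filterMap_append]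
    congr 1
    · rw [← ih]
      refine List.filterMap_congr (fun n hn => ?_)
      rw [List.getD_eq_getElem?_getD, List.getD_eq_getElem?_getD,
          List.getElem?_append_left (List.mem_range.mp hn)]
    · simp only [List.filterMap_cons, List.filterMap_nil]
      rw [List.getD_eq_getElem?_getD, List.getElem?_concat_length]
      rfl

-- the keys of the selected items form a sublist of the table's prefixed keys
theorem pvMap_fst_filterMap_sel (d : PySem.Dict String String) :
    ∀ tab : List (String × String),
      ((tab.filterMap (pvSel d)).map (fun x => x.1)).Sublist
        (tab.map (fun pk => pk.1 ++ pk.2)) := by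
  intro tab
  induction tab with
  | nil => simp
  | cons p ps ih =>
    cases hget : d.get? p.2 with
    | none =>
      simp only [List.filterMap_cons, List.map_cons, pvSel, hget, Option.map_none]
      exact ih.cons _
    | some v =>
      simp only [List.filterMap_cons, List.map_cons, pvSel, hget, Option.map_some]
      exact ih.cons₂ _

theorem pvTable_keys_nodup : (pvTable.map (fun pk => pk.1 ++ pk.2)).Nodup := by
  simp [pvTable, THETA_C, THETA_P, THETA_S]

-- ===== B-side characterisation =====
theorem pvB_char (conf : List (String × List (List (String × String)))) :
    parse_conf_alt conf = pvTable.filterMap (pvSel (pvFlatten conf)) := by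
  obtain ⟨h1, h2, h3⟩ := pvInv_conf conf
  unfold parse_conf_alt
  set f := (conf.map Prod.snd).foldl (fun f klist =>
    klist.foldl (fun f kv => kv.foldl pvBStep f) f) PySem.Dict.empty with hf
  set L := (List.range 19).filterMap
    (fun n : Nat => (f.get? (n : Int)).map (fun pr => ((n : Int), pr))) with hL
  -- the sorted items list is L
  have hitemsnd : f.items.Nodup := List.Nodup.of_map Prod.fst h3
  have hLpw : L.Pairwise (fun a b => a.1 < b.1) := by
    rw [hL]
    refine List.Pairwise.filterMap _ (fun a b hab x hx y hy => ?_) (List.pairwise_lt_range (n := 19))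
    obtain ⟨pa, _, hpa⟩ := Option.map_eq_some_iff.mp hx
    obtain ⟨pb, _, hpb⟩ := Option.map_eq_some_iff.mp hy
    rw [← hpa, ← hpb]
    show (a : Int) < (b : Int)
    exact_mod_cast hab
  have hLnodup : L.Nodup := hLpw.imp (fun hlt heq => by rw [heq] at hlt; exact lt_irrefl _ hlt)
  have hmem : ∀ a, a ∈ L ↔ a ∈ f.items := by
    intro a
    constructor
    · intro ha
      rw [hL] at ha
      obtain ⟨n, _, hn⟩ := List.mem_filterMap.mp ha
      obtain ⟨pr, hpr, hpa⟩ := Option.map_eq_some_iff.mp hn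
      have : f.get? a.1 = some a.2 := by rw [← hpa]; exact hpr
      exact PySem.Dict.mem_items_of_get?_eq_some f this
    · intro ha
      have hget : f.get? a.1 = some a.2 := PySem.Dict.get?_of_mem_items f ha h3
      obtain ⟨n, hn, hjn⟩ := h2 a.1 (PySem.Dict.mem_keys_of_mem_items f ha)
      rw [hL]
      refine List.mem_filterMap.mpr ⟨n, List.mem_range.mpr hn, ?_⟩
      rw [← hjn, hget]
      simp
  have hsorted : PySem.List.sorted f.items (fun item => item.1) false = L :=
    PySem.List.sorted_eq_of_perm_of_pairwise_lt f.items L (fun item => item.1)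
      ((List.perm_ext_iff_of_nodup hLnodup hitemsnd).mpr hmem) hLpw
  -- the second components of L are exactly the selected items
  have hsnd : L.map (fun it => it.2) = pvTable.filterMap (pvSel (pvFlatten conf)) := by
    rw [hL, List.map_filterMap]
    have e1 : ∀ n ∈ List.range 19,
        ((f.get? (n : Int)).map (fun pr => ((n : Int), pr))).map (fun it => it.2)
          = pvSel (pvFlatten conf) (pvEnt n) := by
      intro n hn
      rw [Option.map_map]
      have : ((fun it : Int × (String × String) => it.2) ∘ (fun pr => ((n : Int), pr)))
          = id := rfl
      rw [this, Option.map_id, h1 n (List.mem_range.mp hn)]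
      rfl
    rw [List.filterMap_congr e1,
        show (19 : Nat) = pvTable.length from rfl]
    exact pvFilterMap_range pvTable ("", "") (pvSel (pvFlatten conf))
  -- the prefixed keys emitted are distinct, so the final dict build appends them all
  have hknodup : (L.map (fun it => it.2.1)).Nodup := by
    have : L.map (fun it => it.2.1) = (L.map (fun it => it.2)).map (fun x => x.1) := by
      rw [List.map_map]; rfl
    rw [this, hsnd]
    exact ((pvMap_fst_filterMap_sel (pvFlatten conf) pvTable).nodup pvTable_keys_nodup)
  show ((PySem.List.sorted f.items fun item => item.1).foldl
      (fun res item => res.insert item.2.1 item.2.2) PySem.Dict.empty).items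
    = List.filterMap (pvSel (pvFlatten conf)) pvTable
  rw [hsorted]
  have := PySem.Dict.items_foldl_insert_fresh L (fun it => it.2.1) (fun it => it.2.2)
    PySem.Dict.empty (fun a _ => PySem.Dict.contains_empty _) hknodup
  rw [this]
  rw [← hsnd]
  rfl

-- ===== A-side characterisation (machinery) =====
-- a conditional-insert fold over fresh distinct keys appends exactly the selected items
def pvCStep (d : PySem.Dict String String) (acc : PySem.Dict String String)
    (pk : String × String) : PySem.Dict String String :=
  match d.get? pk.2 with
  | some v => acc.insert (pk.1 ++ pk.2) v
  | none => acc

theorem pvFoldl_step_items (d : PySem.Dict String String) :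
    ∀ (tab : List (String × String)) (acc : PySem.Dict String String),
      (tab.map (fun pk => pk.1 ++ pk.2)).Nodup →
      (∀ pk ∈ tab, acc.contains (pk.1 ++ pk.2) = false) →
      (tab.foldl (pvCStep d) acc).items = acc.items ++ tab.filterMap (pvSel d) := by
  intro tab
  induction tab with
  | nil => intro acc _ _; simp
  | cons p ps ih =>
    intro acc hnd hfresh
    rw [List.map_cons, List.nodup_cons] at hnd
    have hfp : acc.contains (p.1 ++ p.2) = false := hfresh p (by simp)
    cases hget : d.get? p.2 with
    | none =>
      have hsel : pvSel d p = none := by simp [pvSel, hget]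
      simp only [List.foldl_cons, List.filterMap_cons, pvCStep, hget, hsel]
      exact ih acc hnd.2 (fun pk h => hfresh pk (by simp [h]))
    | some v =>
      have hsel : pvSel d p = some (p.1 ++ p.2, v) := by simp [pvSel, hget]
      have hfr : ∀ pk ∈ ps, (acc.insert (p.1 ++ p.2) v).contains (pk.1 ++ pk.2) = false := by
        intro pk hpk
        rw [PySem.Dict.contains_insert]
        have hne : ¬ (pk.1 ++ pk.2 = p.1 ++ p.2) := fun h => hnd.1 (h ▸ List.mem_map_of_mem hpk)
        simp [hne, hfresh pk (by simp [hpk])]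
      simp only [List.foldl_cons, List.filterMap_cons, pvCStep, hget, hsel]
      rw [ih (acc.insert (p.1 ++ p.2) v) hnd.2 hfr,
          PySem.Dict.items_insert_of_not_contains acc v hfp, List.append_assoc,
          List.singleton_append]

-- pvSelect is the conditional-insert fold restricted to one prefix block
theorem pvSelect_eq_foldl (d : PySem.Dict String String) (pfx : String) (ks : List String) :
    pvSelect d pfx ks = (ks.map (fun k => (pfx, k))).foldl (pvCStep d) PySem.Dict.empty := by
  rw [List.foldl_map]; rfl

-- a dict.update with fresh, distinct keys appends the pairs
theorem pvUpdate_items_fresh (acc : PySem.Dict String String) (ps : List (String × String))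
    (hnd : (ps.map (fun x => x.1)).Nodup) (hfresh : ∀ p ∈ ps, acc.contains p.1 = false) :
    (acc.update ps).items = acc.items ++ ps := by
  show (ps.foldl (fun d p => d.insert p.1 p.2) acc).items = acc.items ++ ps
  have h := PySem.Dict.items_foldl_insert_fresh ps (fun x => x.1) (fun x => x.2) acc hfresh hnd
  simpa using h

theorem pvA_char (conf : List (String × List (List (String × String)))) :
    parse_conf conf = pvTable.filterMap (pvSel (pvFlatten conf)) := by
  unfold parse_conf
  set d := pvFlatten conf with hd
  dsimp only
  -- split the prefixed keys of the table into the three nodup, pairwise-disjoint blocks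
  have hnd := pvTable_keys_nodup
  rw [pvTable, List.map_append, List.map_append, List.map_map, List.map_map, List.map_map] at hnd
  obtain ⟨hCP, hndS, hdisS⟩ := List.nodup_append.mp hnd
  obtain ⟨hndC, hndP, hdisCP⟩ := List.nodup_append.mp hCP
  -- characterise the three comprehensions of A
  have hitems : ∀ (pfx : String) (ks : List String),
      (ks.map ((fun pk : String × String => pk.1 ++ pk.2) ∘ (fun k => (pfx, k)))).Nodup →
      (pvSelect d pfx ks).items = (ks.map (fun k => (pfx, k))).filterMap (pvSel d) := by
    intro pfx ks h
    rw [pvSelect_eq_foldl,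
        pvFoldl_step_items d _ _ (by rw [List.map_map]; exact h) (by intro pk _; simp)]
    exact List.nil_append _
  have hC := hitems "theta_c-" THETA_C hndC
  have hP := hitems "theta_p-" THETA_P hndP
  have hS := hitems "theta_s-" THETA_S hndS
  rw [hC, hP, hS]
  -- keys of each block of selected items
  have hsub : ∀ (pfx : String) (ks : List String),
      (((ks.map (fun k => (pfx, k))).filterMap (pvSel d)).map (fun x => x.1)).Sublist
        (ks.map ((fun pk : String × String => pk.1 ++ pk.2) ∘ (fun k => (pfx, k)))) := by
    intro pfx ks
    have h := pvMap_fst_filterMap_sel d (ks.map (fun k => (pfx, k)))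
    rwa [List.map_map] at h
  -- A's merged dict, one update at a time
  have e1 : (PySem.Dict.empty.update
        ((THETA_C.map (fun k => ("theta_c-", k))).filterMap (pvSel d))).items
      = (THETA_C.map (fun k => ("theta_c-", k))).filterMap (pvSel d) :=
    (pvUpdate_items_fresh _ _ ((hsub _ _).nodup hndC) (by intro p _; simp)).trans
      (List.nil_append _)
  have fresh2 : ∀ p ∈ (THETA_P.map (fun k => ("theta_p-", k))).filterMap (pvSel d),
      (PySem.Dict.empty.update
        ((THETA_C.map (fun k => ("theta_c-", k))).filterMap (pvSel d))).contains p.1 = false := by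
    intro p hp
    rw [PySem.Dict.contains_eq_decide_mem_keys, decide_eq_false_iff_not]
    simp only [PySem.Dict.keys, e1]
    intro hmem
    have hmC := (hsub "theta_c-" THETA_C).subset hmem
    have hmP := (hsub "theta_p-" THETA_P).subset (List.mem_map_of_mem hp)
    exact hdisCP _ hmC _ hmP rfl
  have e2 : ((PySem.Dict.empty.update
        ((THETA_C.map (fun k => ("theta_c-", k))).filterMap (pvSel d))).update
        ((THETA_P.map (fun k => ("theta_p-", k))).filterMap (pvSel d))).items
      = (THETA_C.map (fun k => ("theta_c-", k))).filterMap (pvSel d)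
        ++ (THETA_P.map (fun k => ("theta_p-", k))).filterMap (pvSel d) := by
    rw [pvUpdate_items_fresh _ _ ((hsub _ _).nodup hndP) fresh2, e1]
  have fresh3 : ∀ p ∈ (THETA_S.map (fun k => ("theta_s-", k))).filterMap (pvSel d),
      ((PySem.Dict.empty.update
        ((THETA_C.map (fun k => ("theta_c-", k))).filterMap (pvSel d))).update
        ((THETA_P.map (fun k => ("theta_p-", k))).filterMap (pvSel d))).contains p.1 = false := by
    intro p hp
    rw [PySem.Dict.contains_eq_decide_mem_keys, decide_eq_false_iff_not]
    simp only [PySem.Dict.keys, e2, List.map_append, List.mem_append]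
    have hmS := (hsub "theta_s-" THETA_S).subset (List.mem_map_of_mem hp)
    rintro (hmem | hmem)
    · exact hdisS _ (List.mem_append_left _ ((hsub "theta_c-" THETA_C).subset hmem)) _ hmS rfl
    · exact hdisS _ (List.mem_append_right _ ((hsub "theta_p-" THETA_P).subset hmem)) _ hmS rfl
  have e3 := pvUpdate_items_fresh _ _ ((hsub "theta_s-" THETA_S).nodup hndS) fresh3
  rw [e3, e2]
  rw [pvTable, List.filterMap_append, List.filterMap_append]

-- ===== VERDICT (by name: the statement is the Claim_ definition above) =====
theorem parse_conf_spec : Claim_equal_parse_conf := by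
  intro conf _
  unfold Spec_parse_conf
  rw [pvA_char, pvB_char]
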